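-- pv_equiv track=rewrite | github.com/chimd715/AlgorithmStudy | Programmers/level2/more_spicy.py | simple_solution
-- ===== SOURCE A (Python) =====
-- def simple_solution(scoville, K):
--     # fails efficiency test
--     count = 0
--     scoville.sort()
--     while scoville[0] < K and len(scoville) > 1:
--         new_food = scoville[0] + scoville[1] * 2
--         scoville = [new_food] + scoville[2:]
--         scoville.sort()
--         count += 1
--
--     if len(scoville) == 1 and scoville[0] < K:
--         return -1
--     return count
-- ===== SOURCE B (Python) =====
-- # B: leftist min-heap (hand-rolled; A imports nothing): pop the two smallest,
-- # push the combination, O(n log n) instead of re-sorting the list each mix.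
-- # Return value only: A also sorts the caller's list in place; B does not mutate it.
--
-- def _rank(t):
--     return 0 if t is None else t[0]
--
--
-- def _make(v, l, m):
--     if _rank(l) >= _rank(m):
--         return (_rank(m) + 1, v, l, m)
--     return (_rank(l) + 1, v, m, l)
--
--
-- def _meld(a, b):
--     if a is None:
--         return b
--     if b is None:
--         return a
--     if b[1] < a[1]:
--         return _make(b[1], b[2], _meld(b[3], a))
--     return _make(a[1], a[2], _meld(a[3], b))
--
--
-- def simple_solution(scoville, K):
--     h = None
--     for v in scoville:
--         h = _meld(h, (1, v, None, None))
--     n = len(scoville)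
--     count = 0
--     while h[1] < K and n > 1:
--         a, h = h[1], _meld(h[2], h[3])
--         b, h = h[1], _meld(h[2], h[3])
--         h = _meld(h, (1, a + 2 * b, None, None))
--         n -= 1
--         count += 1
--     return -1 if h[1] < K else count
-- ===== Notes on version B (the rewrite author's own statement) =====
-- stated objective: faster
-- what changed: Replaces A's re-sort-the-whole-list-after-every-mix loop by a hand-rolled leftist min-heap: build the heap once, then pop the two smallest and push the combined value each iteration.
-- outside the precondition, e.g. on simple_solution([], 5): A raises IndexError, B raises TypeError
import Mathlib
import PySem

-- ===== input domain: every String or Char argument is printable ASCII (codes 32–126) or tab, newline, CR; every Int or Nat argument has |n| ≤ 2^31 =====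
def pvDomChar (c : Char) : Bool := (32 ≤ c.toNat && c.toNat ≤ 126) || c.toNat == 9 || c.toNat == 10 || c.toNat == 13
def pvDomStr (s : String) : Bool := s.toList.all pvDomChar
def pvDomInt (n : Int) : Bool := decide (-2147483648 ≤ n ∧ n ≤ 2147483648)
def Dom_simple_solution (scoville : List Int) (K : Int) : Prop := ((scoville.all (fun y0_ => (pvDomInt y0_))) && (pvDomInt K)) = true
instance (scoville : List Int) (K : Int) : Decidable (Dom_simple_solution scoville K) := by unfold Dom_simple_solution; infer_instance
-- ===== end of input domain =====

-- B replaces A's sort-per-mix loop by a hand-rolled leftist min-heap (pop two smallest,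
-- push the combination).  Return value only: A additionally sorts the caller's list in
-- place; B does not mutate its argument.

-- ===== PORT A =====
-- A's while loop: each iteration replaces the two smallest by their combination and re-sorts.
def pvLoopA (K : Int) : List Int → Int → Int
  | [], _ => 0            -- scoville[0] on the empty list: IndexError (outside Pre_)
  | [x], count => if x < K then -1 else count      -- loop condition false (len == 1); post-check
  | x :: y :: rest, count =>
      if x < K then
        pvLoopA K (PySem.List.sorted ((x + y * 2) :: rest) (fun v => v) false) (count + 1)
      else count          -- loop exits with len > 1 and scoville[0] ≥ K; post-check returns count
  termination_by s _ => s.length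
  decreasing_by simp [PySem.List.length_sorted]

def simple_solution (scoville : List Int) (K : Int) : Int :=
  pvLoopA K (PySem.List.sorted scoville (fun v => v) false) 0

-- ===== PORT B =====
-- a leftist-heap node is the Python tuple (rank, value, left, right); None is .leaf
inductive PvHeap : Type
  | leaf : PvHeap
  | node : Nat → Int → PvHeap → PvHeap → PvHeap
deriving DecidableEq, Repr

def pvRank : PvHeap → Nat
  | .leaf => 0
  | .node r _ _ _ => r

def pvSize : PvHeap → Nat
  | .leaf => 0
  | .node _ _ l t => 1 + pvSize l + pvSize t

-- Python _make
def pvMake (v : Int) (l m : PvHeap) : PvHeap :=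
  if pvRank l ≥ pvRank m then .node (pvRank m + 1) v l m else .node (pvRank l + 1) v m l

-- Python _meld
def pvMeld : PvHeap → PvHeap → PvHeap
  | .leaf, b => b
  | a, .leaf => a
  | .node ra va la ta, .node rb vb lb tb =>
      if vb < va then pvMake vb lb (pvMeld tb (.node ra va la ta))
      else pvMake va la (pvMeld ta (.node rb vb lb tb))
  termination_by a b => pvSize a + pvSize b
  decreasing_by all_goals (simp only [pvSize]; omega)

-- B's while loop: n tracks len(scoville) (python decrements it once per mix)
def pvLoopB (K : Int) : PvHeap → Int → Int → Int
  | .leaf, _, _ => 0        -- h[1] on None: TypeError (only reachable for empty input, outside Pre_)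
  | .node _ v l t, n, count =>
      if v < K ∧ 1 < n then
        match pvMeld l t with
        | .leaf => 0          -- unreachable: n > 1 means the heap still holds a second element
        | .node _ b l2 t2 =>
            pvLoopB K (pvMeld (pvMeld l2 t2) (.node 1 (v + 2 * b) .leaf .leaf)) (n - 1) (count + 1)
      else if v < K then -1 else count
  termination_by _ n _ => n.toNat
  decreasing_by omega

def simple_solution_alt (scoville : List Int) (K : Int) : Int :=
  pvLoopB K (scoville.foldl (fun h v => pvMeld h (.node 1 v .leaf .leaf)) .leaf)
    (scoville.length : Int) 0

-- ===== PRECONDITION & SPEC =====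
-- Pre_ excludes only the empty list, on which both Pythons raise (A IndexError, B TypeError).
def Pre_simple_solution (scoville : List Int) (K : Int) : Prop := scoville ≠ []
instance (scoville : List Int) (K : Int) : Decidable (Pre_simple_solution scoville K) := by
  unfold Pre_simple_solution; infer_instance

def pvWitness_simple_solution : List Int × Int := ([1, 2, 3, 9, 10, 12], 7)

def Spec_simple_solution (scoville : List Int) (K : Int) (out : Int) : Prop := out = simple_solution_alt scoville K
instance (scoville : List Int) (K : Int) (out : Int) : Decidable (Spec_simple_solution scoville K out) := by unfold Spec_simple_solution; infer_instance

-- ===== CLAIM (what is proved, stated in full; the proofs are below) =====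
def Claim_equal_simple_solution : Prop := ∀ (scoville : List Int) (K : Int), Dom_simple_solution scoville K → Pre_simple_solution scoville K → Spec_simple_solution scoville K (simple_solution scoville K)

-- ===== LEMMAS AND PROOFS =====

-- multiset of values stored in a heap
def pvElems : PvHeap → List Int
  | .leaf => []
  | .node _ v l t => v :: (pvElems l ++ pvElems t)

-- heap-order invariant: every root is ≤ everything below it
def pvHO : PvHeap → Prop
  | .leaf => True
  | .node _ v l t => pvHO l ∧ pvHO t ∧ (∀ x ∈ pvElems l, v ≤ x) ∧ (∀ x ∈ pvElems t, v ≤ x)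

theorem pvRoot_le (r : Nat) (v : Int) (l t : PvHeap)
    (hho : pvHO (.node r v l t)) : ∀ x ∈ pvElems (.node r v l t), v ≤ x := by
  simp only [pvHO] at hho
  obtain ⟨_, _, hbl, hbt⟩ := hho
  intro x hx
  simp only [pvElems, List.mem_cons, List.mem_append] at hx
  rcases hx with rfl | hx | hx
  · exact le_rfl
  · exact hbl x hx
  · exact hbt x hx

theorem pvElems_pvMake (v : Int) (l m : PvHeap) :
    (pvElems (pvMake v l m)).Perm (v :: (pvElems l ++ pvElems m)) := by
  unfold pvMake
  split_ifs
  · simp [pvElems]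
  · simp only [pvElems]
    exact List.Perm.cons v List.perm_append_comm

theorem pvHO_pvMake (v : Int) (l m : PvHeap) (hl : pvHO l) (hm : pvHO m)
    (hbl : ∀ x ∈ pvElems l, v ≤ x) (hbm : ∀ x ∈ pvElems m, v ≤ x) :
    pvHO (pvMake v l m) := by
  unfold pvMake
  split_ifs
  · exact ⟨hl, hm, hbl, hbm⟩
  · exact ⟨hm, hl, hbm, hbl⟩

theorem pvElems_pvMeld (a b : PvHeap) :
    (pvElems (pvMeld a b)).Perm (pvElems a ++ pvElems b) := by
  fun_induction pvMeld a b with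
  | case1 b => simp [pvElems]
  | case2 a h => simp [pvElems]
  | case3 ra va la ta rb vb lb tb hlt ih =>
      have step1 := (pvElems_pvMake vb lb (pvMeld tb (.node ra va la ta))).trans
        (List.Perm.cons vb (List.Perm.append_left (pvElems lb) ih))
      refine step1.trans ?_
      have hB : pvElems (PvHeap.node rb vb lb tb) = vb :: (pvElems lb ++ pvElems tb) := rfl
      rw [hB]
      have step2 : (pvElems lb ++ (pvElems tb ++ pvElems (PvHeap.node ra va la ta))).Perm
          (pvElems (PvHeap.node ra va la ta) ++ (pvElems lb ++ pvElems tb)) := by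
        rw [← List.append_assoc]
        exact List.perm_append_comm
      exact (List.Perm.cons vb step2).trans List.perm_middle.symm
  | case4 ra va la ta rb vb lb tb hlt ih =>
      have step1 := (pvElems_pvMake va la (pvMeld ta (.node rb vb lb tb))).trans
        (List.Perm.cons va (List.Perm.append_left (pvElems la) ih))
      refine step1.trans ?_
      have hA : pvElems (PvHeap.node ra va la ta) ++ pvElems (PvHeap.node rb vb lb tb)
          = va :: (pvElems la ++ (pvElems ta ++ pvElems (PvHeap.node rb vb lb tb))) := by
        simp [pvElems]
      exact List.Perm.of_eq hA.symm

theorem pvHO_pvMeld (a b : PvHeap) : pvHO a → pvHO b → pvHO (pvMeld a b) := by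
  fun_induction pvMeld a b with
  | case1 b => intro _ hb; exact hb
  | case2 a h => intro ha _; exact ha
  | case3 ra va la ta rb vb lb tb hlt ih =>
      intro ha hb
      have hb' := hb
      simp only [pvHO] at hb'
      obtain ⟨hlb, htb, hblb, hbtb⟩ := hb'
      refine pvHO_pvMake _ _ _ hlb (ih htb ha) hblb ?_
      intro x hx
      have hx' := (pvElems_pvMeld tb (.node ra va la ta)).mem_iff.mp hx
      rcases List.mem_append.mp hx' with h | h
      · exact hbtb x h
      · exact le_trans hlt.le (pvRoot_le ra va la ta ha x h)
  | case4 ra va la ta rb vb lb tb hlt ih =>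
      intro ha hb
      have ha' := ha
      simp only [pvHO] at ha'
      obtain ⟨hla, hta, hbla, hbta⟩ := ha'
      refine pvHO_pvMake _ _ _ hla (ih hta hb) hbla ?_
      intro x hx
      have hx' := (pvElems_pvMeld ta (.node rb vb lb tb)).mem_iff.mp hx
      rcases List.mem_append.mp hx' with h | h
      · exact hbta x h
      · exact le_trans (not_lt.mp hlt) (pvRoot_le rb vb lb tb hb x h)

-- the root of a heap-ordered heap that is a permutation of a sorted list is its head
theorem pvRoot_eq (r : Nat) (v : Int) (l t : PvHeap) (x : Int) (s' : List Int)
    (hho : pvHO (.node r v l t)) (hperm : (pvElems (.node r v l t)).Perm (x :: s'))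
    (hsort : (x :: s').Pairwise (· ≤ ·)) : v = x := by
  have hv_mem : v ∈ x :: s' := hperm.mem_iff.mp (by simp [pvElems])
  have hx_mem : x ∈ pvElems (.node r v l t) := hperm.mem_iff.mpr (by simp)
  have h1 : x ≤ v := by
    rcases List.mem_cons.mp hv_mem with h | h
    · exact h.ge
    · exact (List.pairwise_cons.mp hsort).1 v h
  exact le_antisymm (pvRoot_le r v l t hho x hx_mem) h1

theorem pvLoop_eq : ∀ (N : Nat) (K : Int) (s : List Int) (h : PvHeap) (c : Int),
    s.length = N → (pvElems h).Perm s → s.Pairwise (· ≤ ·) → pvHO h →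
    pvLoopA K s c = pvLoopB K h (s.length : Int) c := by
  intro N
  induction N using Nat.strong_induction_on with
  | _ N IH =>
  intro K s h c hN hperm hsort hho
  cases s with
  | nil =>
    cases h with
    | leaf => simp [pvLoopA, pvLoopB]
    | node r v l t =>
      have h0 : pvElems (PvHeap.node r v l t) = [] := hperm.eq_nil
      simp [pvElems] at h0
  | cons x s' =>
    cases h with
    | leaf =>
      exact (List.cons_ne_nil x s' hperm.symm.eq_nil).elim
    | node r v l t =>
      have hvx : v = x := pvRoot_eq r v l t x s' hho hperm hsort
      subst hvx
      have hho' := hho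
      simp only [pvHO] at hho'
      obtain ⟨hl, ht, hbl, hbt⟩ := hho'
      have htail : (pvElems l ++ pvElems t).Perm s' := by
        have h0 : (v :: (pvElems l ++ pvElems t)).Perm (v :: s') := by
          simpa [pvElems] using hperm
        exact h0.cons_inv
      cases s' with
      | nil =>
        simp [pvLoopA, pvLoopB]
      | cons y s'' =>
        by_cases hvK : v < K
        · -- loop body on both sides
          have hlen1 : (1 : Int) < ((v :: y :: s'').length : Int) := by
            push_cast [List.length_cons]
            omega
          have hmeldperm : (pvElems (pvMeld l t)).Perm (y :: s'') :=
            (pvElems_pvMeld l t).trans htail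
          have hmho : pvHO (pvMeld l t) := pvHO_pvMeld l t hl ht
          cases hmeld : pvMeld l t with
          | leaf =>
            rw [hmeld] at hmeldperm
            exact (List.cons_ne_nil y s'' hmeldperm.symm.eq_nil).elim
          | node r2 b l2 t2 =>
            rw [hmeld] at hmeldperm hmho
            have hsort' : (y :: s'').Pairwise (· ≤ ·) := (List.pairwise_cons.mp hsort).2
            have hby : b = y := pvRoot_eq r2 b l2 t2 y s'' hmho hmeldperm hsort'
            subst hby
            have hmho' := hmho
            simp only [pvHO] at hmho'
            obtain ⟨hl2, ht2, hbl2, hbt2⟩ := hmho'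
            have htail2 : (pvElems l2 ++ pvElems t2).Perm s'' := by
              have h0 : (b :: (pvElems l2 ++ pvElems t2)).Perm (b :: s'') := by
                simp only [pvElems] at hmeldperm
                exact hmeldperm
              exact h0.cons_inv
            -- the new heap after the mix
            have hperm2 :
                (pvElems (pvMeld (pvMeld l2 t2) (.node 1 (v + 2 * b) .leaf .leaf))).Perm
                  (PySem.List.sorted ((v + b * 2) :: s'') (fun w => w) false) := by
              refine (pvElems_pvMeld _ _).trans ?_
              have e1 : (pvElems (pvMeld l2 t2) ++ pvElems (PvHeap.node 1 (v + 2 * b) .leaf .leaf)).Perm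
                  (s'' ++ [v + 2 * b]) := by
                simpa [pvElems] using
                  List.Perm.append_right [v + 2 * b] ((pvElems_pvMeld l2 t2).trans htail2)
              refine e1.trans ?_
              have e2 : (s'' ++ [v + 2 * b]).Perm ((v + 2 * b) :: s'') := by
                simpa using (List.perm_middle (l₁ := s'') (l₂ := []) (a := v + 2 * b))
              refine e2.trans ?_
              have e3 : v + 2 * b = v + b * 2 := by ring
              rw [e3]
              exact (PySem.List.sorted_perm _ _ _).symm
            have hsort2 : (PySem.List.sorted ((v + b * 2) :: s'') (fun w => w) false).Pairwise (· ≤ ·) := by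
              simpa using PySem.List.sorted_pairwise ((v + b * 2) :: s'') (fun w => w)
            have hho2 : pvHO (pvMeld (pvMeld l2 t2) (.node 1 (v + 2 * b) .leaf .leaf)) := by
              refine pvHO_pvMeld _ _ (pvHO_pvMeld l2 t2 hl2 ht2) ?_
              exact ⟨trivial, trivial, by simp [pvElems], by simp [pvElems]⟩
            have hlen2 : (PySem.List.sorted ((v + b * 2) :: s'') (fun w => w) false).length
                = s''.length + 1 := by
              simp [PySem.List.length_sorted]
            have hrec := IH (s''.length + 1) (by simp at hN; omega) K
              (PySem.List.sorted ((v + b * 2) :: s'') (fun w => w) false)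
              (pvMeld (pvMeld l2 t2) (.node 1 (v + 2 * b) .leaf .leaf))
              (c + 1) hlen2 hperm2 hsort2 hho2
            -- unfold one step on each side
            rw [pvLoopA, if_pos hvK]
            rw [pvLoopB.eq_def]
            simp only [hmeld]
            rw [if_pos ⟨hvK, hlen1⟩]
            have hn : ((v :: b :: s'').length : Int) - 1
                = ((PySem.List.sorted ((v + b * 2) :: s'') (fun w => w) false).length : Int) := by
              simp only [hlen2, List.length_cons]
              push_cast
              omega
            rw [hn]
            exact hrec
        · -- loop condition false on both sides: both return count
          rw [pvLoopA, if_neg hvK]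
          rw [pvLoopB.eq_def]
          simp [hvK]

theorem pvBuild (xs : List Int) : ∀ (h : PvHeap), pvHO h →
    pvHO (xs.foldl (fun h v => pvMeld h (.node 1 v .leaf .leaf)) h) ∧
    (pvElems (xs.foldl (fun h v => pvMeld h (.node 1 v .leaf .leaf)) h)).Perm (pvElems h ++ xs) := by
  induction xs with
  | nil => intro h hh; exact ⟨hh, by simp⟩
  | cons v xs ih =>
    intro h hh
    simp only [List.foldl_cons]
    have hone : pvHO (PvHeap.node 1 v .leaf .leaf) :=
      ⟨trivial, trivial, by simp [pvElems], by simp [pvElems]⟩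
    obtain ⟨h1, h2⟩ := ih (pvMeld h (.node 1 v .leaf .leaf)) (pvHO_pvMeld h _ hh hone)
    refine ⟨h1, h2.trans ?_⟩
    have e1 : (pvElems (pvMeld h (.node 1 v .leaf .leaf))).Perm (pvElems h ++ [v]) := by
      simpa [pvElems] using pvElems_pvMeld h (.node 1 v .leaf .leaf)
    have := e1.append_right xs
    simpa [List.append_assoc] using this

theorem simple_solution_spec' (scoville : List Int) (K : Int) :
    simple_solution scoville K = simple_solution_alt scoville K := by
  unfold simple_solution simple_solution_alt
  obtain ⟨hho, hperm⟩ := pvBuild scoville .leaf trivial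
  simp only [pvElems, List.nil_append] at hperm
  have hs : (pvElems (scoville.foldl (fun h v => pvMeld h (.node 1 v .leaf .leaf)) .leaf)).Perm
      (PySem.List.sorted scoville (fun v => v) false) :=
    hperm.trans (PySem.List.sorted_perm _ _ _).symm
  have hsorted : (PySem.List.sorted scoville (fun v => v) false).Pairwise (· ≤ ·) := by
    simpa using PySem.List.sorted_pairwise scoville (fun v => v)
  have := pvLoop_eq (PySem.List.sorted scoville (fun v => v) false).length K
    (PySem.List.sorted scoville (fun v => v) false)
    (scoville.foldl (fun h v => pvMeld h (.node 1 v .leaf .leaf)) .leaf) 0 rfl hs hsorted hho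
  rw [PySem.List.length_sorted] at this
  exact this

-- ===== VERDICT (by name: the statement is the Claim_ definition above) =====
theorem simple_solution_spec : Claim_equal_simple_solution := by
  intro scoville K _ _
  unfold Spec_simple_solution
  exact simple_solution_spec' scoville K
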